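-- pv_equiv track=rewrite | github.com/715494637/22do_tmpmail | tmp_mail.py | decode_cf_email
-- ===== SOURCE A (Python) =====
-- def decode_cf_email(hex_str: str) -> str:
--     """Decode a Cloudflare-obfuscated email from its hex representation."""
--     if not hex_str or len(hex_str) < 2 or len(hex_str) % 2 != 0:
--         return ""
--     key = int(hex_str[:2], 16)
--     return "".join(
--         chr(int(hex_str[i : i + 2], 16) ^ key)
--         for i in range(2, len(hex_str), 2)
--     )
-- ===== SOURCE B (Python) =====
-- def decode_cf_email(hex_str: str) -> str:
--     """Decode a Cloudflare-obfuscated email from its hex representation."""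
--     if not hex_str or len(hex_str) < 2 or len(hex_str) % 2 != 0:
--         return ""
--     data = bytes.fromhex(hex_str)
--     table = bytes(b ^ data[0] for b in range(256))
--     return data[1:].translate(table).decode("latin-1")
-- ===== Notes on version B (the rewrite author's own statement) =====
-- stated objective: alternative
-- what changed: B parses the hex once with bytes.fromhex, builds a 256-entry XOR translation table, and decodes via bytes.translate + latin-1 decode, instead of A's index loop that slices two-char substrings and calls int(pair,16) and chr per byte.
-- outside the precondition, e.g. on decode_cf_email('20 041'): A returns ' a', B raises ValueError
import Mathlib
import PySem

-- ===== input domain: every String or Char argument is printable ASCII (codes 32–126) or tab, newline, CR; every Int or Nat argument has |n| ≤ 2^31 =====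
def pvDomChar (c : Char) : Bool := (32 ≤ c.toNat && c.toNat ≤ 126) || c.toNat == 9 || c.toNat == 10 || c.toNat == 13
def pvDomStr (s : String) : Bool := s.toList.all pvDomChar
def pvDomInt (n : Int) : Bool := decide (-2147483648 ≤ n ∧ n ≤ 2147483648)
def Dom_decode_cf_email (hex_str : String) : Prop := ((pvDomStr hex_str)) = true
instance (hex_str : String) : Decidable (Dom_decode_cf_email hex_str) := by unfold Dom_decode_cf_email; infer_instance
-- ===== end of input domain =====

-- B parses the hex once with bytes.fromhex, builds a 256-entry XOR translation table and decodes
-- by bytes.translate + latin-1 decode, instead of A's slice-and-int(pair,16) index loop (alternative).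

-- ===== PORT A =====
def decode_cf_email (hex_str : String) : String :=
  let cs := hex_str.toList
  if cs.isEmpty ∨ cs.length < 2 ∨ cs.length % 2 ≠ 0 then ""
  else
    -- int(hex_str[:2], 16); Pre_ excludes the inputs where Python raises ValueError (parse = none)
    let key := (PySem.Int.ofCharsBase? (PySem.List.slice cs none (some 2)) 16).getD 0
    String.ofList ((PySem.List.pyRange 2 (cs.length : Int) 2).map
      (fun i => Char.ofNat
        ((PySem.Int.bxor
            ((PySem.Int.ofCharsBase? (PySem.List.slice cs (some i) (some (i + 2))) 16).getD 0)
            key).toNat)))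

-- ===== PORT B =====
-- hand port of bytes.fromhex: exact on strings made only of hex digits (Pre_'s domain); none = ValueError
def pvFromHexDigit? (c : Char) : Option Nat :=
  if '0' ≤ c ∧ c ≤ '9' then some (c.toNat - 48)
  else if 'a' ≤ c ∧ c ≤ 'f' then some (c.toNat - 87)
  else if 'A' ≤ c ∧ c ≤ 'F' then some (c.toNat - 55)
  else none

-- bytes.fromhex skips ASCII whitespace between byte pairs (exact for CPython ≥ 3.11)
def pvIsHexWS (c : Char) : Bool :=
  c == ' ' || c == '\t' || c == '\n' || c == '\r' || c.toNat == 11 || c.toNat == 12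

def pvFromHex? : List Char → Option (List Nat)
  | [] => some []
  | c1 :: rest =>
    if pvIsHexWS c1 then pvFromHex? rest
    else
      match rest with
      | c2 :: rest2 =>
        match pvFromHexDigit? c1, pvFromHexDigit? c2, pvFromHex? rest2 with
        | some h, some l, some bs => some ((h * 16 + l) :: bs)
        | _, _, _ => none
      | [] => none

def decode_cf_email_alt (hex_str : String) : String :=
  let cs := hex_str.toList
  if cs.isEmpty ∨ cs.length < 2 ∨ cs.length % 2 ≠ 0 then ""
  else
    match pvFromHex? cs with
    | some (key :: rest) =>
      -- table = bytes(b ^ key for b in range(256))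
      let table := (List.range 256).map (fun b => b ^^^ key)
      -- data[1:].translate(table).decode("latin-1"): byte b ↦ chr(table[b])
      String.ofList (rest.map (fun b => Char.ofNat (table.getD b 0)))
    | _ => ""  -- fromhex raised (excluded by Pre_) or empty (unreachable: length ≥ 2)

-- ===== PRECONDITION & SPEC =====
def pvHexChars : List Char :=
  ['0','1','2','3','4','5','6','7','8','9','a','b','c','d','e','f','A','B','C','D','E','F']

-- Pre_ excludes even-length strings (length ≥ 2) containing a non-hex-digit character: there A
-- usually raises ValueError, and when whitespace/sign characters happen to form int()-parsable
-- pairs A returns an accidental value that B's bytes.fromhex rejects with ValueError.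
def Pre_decode_cf_email (hex_str : String) : Prop :=
  hex_str.toList.length < 2 ∨ hex_str.toList.length % 2 ≠ 0 ∨
    hex_str.toList.all (fun c => pvHexChars.contains c) = true
instance (hex_str : String) : Decidable (Pre_decode_cf_email hex_str) := by
  unfold Pre_decode_cf_email; infer_instance

def pvWitness_decode_cf_email : String := "4a2b29"

def Spec_decode_cf_email (hex_str : String) (out : String) : Prop := out = decode_cf_email_alt hex_str
instance (hex_str : String) (out : String) : Decidable (Spec_decode_cf_email hex_str out) := by unfold Spec_decode_cf_email; infer_instance

-- ===== CLAIM (what is proved, stated in full; the proofs are below) =====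
def Claim_equal_decode_cf_email : Prop := ∀ (hex_str : String), Dom_decode_cf_email hex_str → Pre_decode_cf_email hex_str → Spec_decode_cf_email hex_str (decode_cf_email hex_str)

-- ===== LEMMAS AND PROOFS =====

-- map each consecutive pair of characters
def pvPairs {β : Type} (g : Char → Char → β) : List Char → List β
  | c1 :: c2 :: rest => g c1 c2 :: pvPairs g rest
  | _ => []

set_option maxRecDepth 4000 in
lemma pvHexPair_val_bool : (pvHexChars.all fun c1 => pvHexChars.all fun c2 =>
    PySem.Int.ofCharsBase? [c1, c2] 16 ==
      some (((pvFromHexDigit? c1).getD 0 * 16 + (pvFromHexDigit? c2).getD 0 : Nat) : Int)) = true := by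
  decide

lemma pvHexPair_val : ∀ c1 ∈ pvHexChars, ∀ c2 ∈ pvHexChars,
    PySem.Int.ofCharsBase? [c1, c2] 16 =
      some (((pvFromHexDigit? c1).getD 0 * 16 + (pvFromHexDigit? c2).getD 0 : Nat) : Int) := by
  have h := pvHexPair_val_bool
  simp only [List.all_eq_true, beq_iff_eq] at h
  exact h

lemma pvHexDigit_isSome_bool : (pvHexChars.all fun c => (pvFromHexDigit? c).isSome) = true := by
  decide

lemma pvHexDigit_isSome : ∀ c ∈ pvHexChars, (pvFromHexDigit? c).isSome = true := by
  have h := pvHexDigit_isSome_bool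
  simp only [List.all_eq_true] at h
  exact h

lemma pvHexDigit_lt16_bool : (pvHexChars.all fun c => (pvFromHexDigit? c).getD 0 < 16) = true := by
  decide

lemma pvHexDigit_lt16 : ∀ c ∈ pvHexChars, (pvFromHexDigit? c).getD 0 < 16 := by
  have h := pvHexDigit_lt16_bool
  simp only [List.all_eq_true, decide_eq_true_eq] at h
  exact h

lemma pvHex_not_ws_bool : (pvHexChars.all fun c => !pvIsHexWS c) = true := by
  decide

lemma pvHex_not_ws : ∀ c ∈ pvHexChars, pvIsHexWS c = false := by
  have h := pvHex_not_ws_bool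
  simp only [List.all_eq_true, Bool.not_eq_true'] at h
  exact h

-- the translation table realises the XOR on every byte value
lemma pvTable_getD (key : Nat) (b : Nat) (hb : b < 256) :
    ((List.range 256).map (fun x => x ^^^ key)).getD b 0 = b ^^^ key := by
  rw [List.getD_eq_getElem?_getD, List.getElem?_map, List.getElem?_range hb]
  rfl

lemma pv_bxor_coe (a b : Nat) : PySem.Int.bxor (a : Int) (b : Int) = ((a ^^^ b : Nat) : Int) := by
  simp [PySem.Int.bxor]

lemma pvPyRange_two_nil (a b : Int) (h : b ≤ a) : PySem.List.pyRange a b 2 = [] := by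
  rw [PySem.List.pyRange_of_pos a b (by norm_num)]
  simp [show ¬ a < b by omega]

lemma pvPyRange_two_cons (a b : Int) (h : a < b) :
    PySem.List.pyRange a b 2 = a :: PySem.List.pyRange (a + 2) b 2 := by
  rw [PySem.List.pyRange_of_pos a b (by norm_num), PySem.List.pyRange_of_pos (a + 2) b (by norm_num)]
  rw [if_pos h]
  have h1 : ((b - a + 2 - 1) / 2).toNat
      = (if a + 2 < b then ((b - (a + 2) + 2 - 1) / 2).toNat else 0) + 1 := by
    split_ifs <;> omega
  rw [h1, List.range_succ_eq_map, List.map_cons, List.map_map]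
  congr 1
  · simp
  · apply List.map_congr_left
    intro k _
    simp [Nat.succ_eq_add_one]
    ring

lemma pvMap_pyRange_slice {β : Type} (g : List Char → β) :
    ∀ (m j : Nat) (cs : List Char), cs.length = j + 2 * m →
      (PySem.List.pyRange (j : Int) (cs.length : Int) 2).map
          (fun i => g (PySem.List.slice cs (some i) (some (i + 2))))
        = pvPairs (fun c1 c2 => g [c1, c2]) (cs.drop j) := by
  intro m
  induction m with
  | zero =>
    intro j cs hlen
    rw [pvPyRange_two_nil _ _ (by omega)]
    have hd : cs.drop j = [] := by
      apply List.drop_eq_nil_of_le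
      omega
    rw [hd]
    rfl
  | succ m ih =>
    intro j cs hlen
    have hlt : (j : Int) < (cs.length : Int) := by omega
    rw [pvPyRange_two_cons _ _ hlt, List.map_cons]
    have hdrop : 2 ≤ (cs.drop j).length := by simp; omega
    obtain ⟨c1, t1, h1⟩ := List.exists_cons_of_ne_nil
      (l := cs.drop j) (by intro h; rw [h] at hdrop; simp at hdrop)
    obtain ⟨c2, t2, h2⟩ := List.exists_cons_of_ne_nil
      (l := t1) (by intro h; rw [h] at h1; rw [h1] at hdrop; simp at hdrop)
    have hslice : PySem.List.slice cs (some (j : Int)) (some ((j : Int) + 2)) = [c1, c2] := by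
      have hs := PySem.List.slice_natCast_add cs j 2
      rw [show ((2 : Nat) : Int) = (2 : Int) by norm_num] at hs
      rw [hs, h1, h2]
      rfl
    have htail : cs.drop (j + 2) = t2 := by
      have hd : cs.drop (j + 2) = (cs.drop j).drop 2 := by rw [List.drop_drop]
      rw [hd, h1, h2]
      rfl
    rw [h1, h2, pvPairs]
    congr 1
    · rw [hslice]
    · have hcast : (j : Int) + 2 = ((j + 2 : Nat) : Int) := by push_cast; ring
      rw [hcast, ih (j + 2) cs (by omega), htail]

lemma pvFromHex_pairs :
    ∀ (m : Nat) (cs : List Char), cs.length = 2 * m → (∀ c ∈ cs, c ∈ pvHexChars) →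
      pvFromHex? cs =
        some (pvPairs (fun c1 c2 => (pvFromHexDigit? c1).getD 0 * 16 + (pvFromHexDigit? c2).getD 0) cs) := by
  intro m
  induction m with
  | zero =>
    intro cs hlen _
    have h : cs = [] := List.length_eq_zero_iff.mp (by omega)
    subst h
    rfl
  | succ m ih =>
    intro cs hlen hhex
    match cs, hlen with
    | c1 :: c2 :: rest, hlen =>
      have h1 : c1 ∈ pvHexChars := hhex c1 (by simp)
      have h2 : c2 ∈ pvHexChars := hhex c2 (by simp)
      obtain ⟨d1, e1⟩ := Option.isSome_iff_exists.mp (pvHexDigit_isSome c1 h1)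
      obtain ⟨d2, e2⟩ := Option.isSome_iff_exists.mp (pvHexDigit_isSome c2 h2)
      have hr : rest.length = 2 * m := by simp at hlen; omega
      have ihr := ih rest hr (fun c hc => hhex c (by simp [hc]))
      have hws : pvIsHexWS c1 = false := pvHex_not_ws c1 h1
      rw [pvFromHex?, hws]
      simp only [Bool.false_eq_true, if_false]
      rw [e1, e2, ihr, pvPairs, e1, e2]
      rfl

lemma pvPairs_map {β γ : Type} (f : Char → Char → β) (h : β → γ) :
    ∀ l : List Char, (pvPairs f l).map h = pvPairs (fun a b => h (f a b)) l
  | [] => rfl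
  | [_] => rfl
  | c1 :: c2 :: rest => by
    rw [pvPairs, pvPairs, List.map_cons, pvPairs_map f h rest]

lemma pvPairs_congr {β : Type} (f g : Char → Char → β) :
    ∀ l : List Char, (∀ a ∈ l, ∀ b ∈ l, f a b = g a b) → pvPairs f l = pvPairs g l
  | [], _ => rfl
  | [_], _ => rfl
  | c1 :: c2 :: rest, h => by
    rw [pvPairs, pvPairs, h c1 (by simp) c2 (by simp),
      pvPairs_congr f g rest (fun a ha b hb => h a (by simp [ha]) b (by simp [hb]))]

-- ===== VERDICT (by name: the statement is the Claim_ definition above) =====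
theorem decode_cf_email_spec : Claim_equal_decode_cf_email := by
  intro s _ hpre
  unfold Spec_decode_cf_email decode_cf_email decode_cf_email_alt
  unfold Pre_decode_cf_email at hpre
  simp only []
  generalize hgen : s.toList = cs at hpre ⊢
  by_cases hg : cs.isEmpty ∨ cs.length < 2 ∨ cs.length % 2 ≠ 0
  · rw [if_pos hg, if_pos hg]
  · rw [if_neg hg, if_neg hg]
    push Not at hg
    obtain ⟨-, hlen2, heven⟩ := hg
    have hhex : ∀ c ∈ cs, c ∈ pvHexChars := by
      rcases hpre with h | h | h
      · omega
      · omega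
      · intro c hc
        have hcm := List.all_eq_true.mp h c hc
        simpa using hcm
    obtain ⟨m, hm⟩ : ∃ m, cs.length = 2 * m := ⟨cs.length / 2, by omega⟩
    match cs, hm, hhex with
    | c1 :: c2 :: rest, hm, hhex =>
      have h1 : c1 ∈ pvHexChars := hhex c1 (by simp)
      have h2 : c2 ∈ pvHexChars := hhex c2 (by simp)
      have hhexr : ∀ c ∈ rest, c ∈ pvHexChars := fun c hc => hhex c (by simp [hc])
      obtain ⟨d1, e1⟩ := Option.isSome_iff_exists.mp (pvHexDigit_isSome c1 h1)
      obtain ⟨d2, e2⟩ := Option.isSome_iff_exists.mp (pvHexDigit_isSome c2 h2)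
      -- the key byte
      have hslice0 : PySem.List.slice (c1 :: c2 :: rest) none (some 2) = [c1, c2] := by
        rw [PySem.List.slice_to]
        · rfl
        · norm_num
      have hkey : (PySem.Int.ofCharsBase? (PySem.List.slice (c1 :: c2 :: rest) none (some 2)) 16).getD 0
          = (((pvFromHexDigit? c1).getD 0 * 16 + (pvFromHexDigit? c2).getD 0 : Nat) : Int) := by
        rw [hslice0, pvHexPair_val c1 h1 c2 h2]
        rfl
      -- B's byte buffer
      have hBb := pvFromHex_pairs m (c1 :: c2 :: rest) hm hhex
      rw [pvPairs] at hBb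
      -- A's mapped range, via the pair decomposition at offset 2
      have hA := pvMap_pyRange_slice
        (g := fun pair => Char.ofNat
          ((PySem.Int.bxor ((PySem.Int.ofCharsBase? pair 16).getD 0)
            (((pvFromHexDigit? c1).getD 0 * 16 + (pvFromHexDigit? c2).getD 0 : Nat) : Int)).toNat))
        (m - 1) 2 (c1 :: c2 :: rest) (by simp at hm ⊢; omega)
      rw [show ((2 : Nat) : Int) = (2 : Int) by norm_num] at hA
      rw [hkey, hA, hBb]
      simp only [pvPairs_map]
      congr 1
      apply pvPairs_congr
      intro a ha b hb
      have ha2 : a ∈ pvHexChars := hhexr a ha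
      have hb2 : b ∈ pvHexChars := hhexr b hb
      have hbyte : (pvFromHexDigit? a).getD 0 * 16 + (pvFromHexDigit? b).getD 0 < 256 := by
        have := pvHexDigit_lt16 a ha2
        have := pvHexDigit_lt16 b hb2
        omega
      rw [pvHexPair_val a ha2 b hb2, Option.getD_some, pv_bxor_coe,
        pvTable_getD _ _ hbyte]
      simp
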